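-- pv_equiv track=rewrite | github.com/Phil-DS/AdventOfCode2023 | Day 12/day12_1.py | permutateString
-- ===== SOURCE A (Python) =====
-- def permutateString(s: str):
--     poses = [i for i,c in enumerate(s) if c == '?']
--
--     if not poses:
--         yield s
--         return
--
--     o = [*s]
--     for i in range(1<<len(poses)):
--         for j,pos in enumerate(poses):
--             o[pos] = '#' if (1 << j) & i else '.'
--         yield ''.join(o)
-- ===== SOURCE B (Python) =====
-- def permutateString(s: str):
--     poses = [i for i, c in enumerate(s) if c == '?']
--
--     if not poses:
--         yield s
--         return
--
--     o = [*s]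
--
--     def rec(j):
--         if j < 0:
--             yield ''.join(o)
--             return
--         o[poses[j]] = '.'
--         yield from rec(j - 1)
--         o[poses[j]] = '#'
--         yield from rec(j - 1)
--
--     yield from rec(len(poses) - 1)
-- ===== Notes on version B (the rewrite author's own statement) =====
-- stated objective: alternative
-- what changed: The bitmask counter loop (re-filling every '?' slot for each i in range(2**n)) is replaced by recursive backtracking over the '?' positions, setting each position once per branch ('.' then '#'), recursing from the last position so the leftmost '?' varies fastest and the yield order matches A exactly.
import Mathlib
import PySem

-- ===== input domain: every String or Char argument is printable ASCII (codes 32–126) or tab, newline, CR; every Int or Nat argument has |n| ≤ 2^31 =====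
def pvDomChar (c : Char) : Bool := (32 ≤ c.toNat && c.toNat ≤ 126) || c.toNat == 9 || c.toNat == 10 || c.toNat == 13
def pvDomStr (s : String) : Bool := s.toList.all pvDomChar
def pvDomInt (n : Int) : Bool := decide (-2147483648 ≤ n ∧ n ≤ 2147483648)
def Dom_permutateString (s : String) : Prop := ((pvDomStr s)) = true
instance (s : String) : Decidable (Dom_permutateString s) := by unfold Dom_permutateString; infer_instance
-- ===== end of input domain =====

-- B replaces A's bitmask counter loop by recursive backtracking over the '?' positions
-- (each branch sets one position to '.' then '#'), same output strings in the same order.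


-- ===== PORT A =====
-- poses = [i for i,c in enumerate(s) if c == '?']  (this first line is shared by both Pythons verbatim)
def posesOf (s : String) : List Int :=
  (PySem.List.enumerate s.toList).filterMap (fun ic => if ic.2 = '?' then some ic.1 else none)

-- for i in range(1 << len(poses)): for j,pos in enumerate(poses): o[pos] = '#' if (1 << j) & i else '.'
-- indices j from enumerate are ≥ 0, so '.toNat' on them is exact; o[pos]= is pySetD (pos always in range).
def permutateString (s : String) : List String :=
  let poses := posesOf s
  if poses = [] then [s]
  else
    let o := s.toList
    let r := (PySem.List.pyRange 0 ((1 <<< poses.length : Nat) : Int)).foldl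
      (fun (acc : List String × List Char) i =>
        let o := (PySem.List.enumerate poses).foldl
          (fun o jp =>
            PySem.List.pySetD o jp.2
              (if PySem.Int.band ((1 : Int) <<< jp.1.toNat) i ≠ 0 then '#' else '.')) acc.2
        (acc.1 ++ [String.ofList o], o))
      ([], o)
    r.1

-- ===== PORT B =====
-- rec(j): j < 0 → yield ''.join(o); else o[poses[j]]='.'; rec(j-1); o[poses[j]]='#'; rec(j-1).
-- Ported with fuel k = j+1 (k = 0 is Python's j = -1); the mutated o is threaded as the second component.
def permRec (poses : List Int) (o : List Char) : Nat → List String × List Char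
  | 0 => ([String.ofList o], o)
  | k + 1 =>
    let p := PySem.List.pyGetD poses (k : Int) 0   -- poses[j], j = k is always in range
    let o1 := PySem.List.pySetD o p '.'
    let r1 := permRec poses o1 k
    let o3 := PySem.List.pySetD r1.2 p '#'
    let r2 := permRec poses o3 k
    (r1.1 ++ r2.1, r2.2)

def permutateString_alt (s : String) : List String :=
  let poses := posesOf s
  if poses = [] then [s]
  else (permRec poses s.toList poses.length).1

-- ===== PRECONDITION & SPEC =====
def Spec_permutateString (s : String) (out : List String) : Prop := out = permutateString_alt s
instance (s : String) (out : List String) : Decidable (Spec_permutateString s out) := by unfold Spec_permutateString; infer_instance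

-- ===== CLAIM (what is proved, stated in full; the proofs are below) =====
def Claim_equal_permutateString : Prop := ∀ (s : String), Dom_permutateString s → Spec_permutateString s (permutateString s)

-- ===== LEMMAS AND PROOFS =====

-- Nat-world picture: positions of '?' as a Nat list, the bit-j character, and the
-- "assign all listed positions according to the bits of i" fold.
def posN : List Char → Nat → List Nat
  | [], _ => []
  | c :: l, i => if c = '?' then i :: posN l (i + 1) else posN l (i + 1)

def vch (j i : Nat) : Char := if 2 ^ j &&& i ≠ 0 then '#' else '.'

-- pairs (pos, j) for the listed positions, j counting from j0
def idxP : List Nat → Nat → List (Nat × Nat)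
  | [], _ => []
  | p :: ps, j => (p, j) :: idxP ps (j + 1)

def asg (ps : List (Nat × Nat)) (o : List Char) (i : Nat) : List Char :=
  ps.foldl (fun o pj => o.set pj.1 (vch pj.2 i)) o

def natCastL (ps : List Nat) : List Int := ps.map (fun m => ((m : Nat) : Int))

theorem natCastL_nil : natCastL [] = [] := rfl

theorem natCastL_cons (p : Nat) (ps : List Nat) :
    natCastL (p :: ps) = ((p : Nat) : Int) :: natCastL ps := rfl

theorem natCastL_length (ps : List Nat) : (natCastL ps).length = ps.length := by
  simp [natCastL]

theorem natCastL_eq_nil_iff (ps : List Nat) : natCastL ps = [] ↔ ps = [] := by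
  simp [natCastL]

theorem asg_nil (o : List Char) (i : Nat) : asg [] o i = o := rfl

theorem asg_cons (p : Nat × Nat) (ps : List (Nat × Nat)) (o : List Char) (i : Nat) :
    asg (p :: ps) o i = asg ps (o.set p.1 (vch p.2 i)) i := rfl

theorem asg_append (ps qs : List (Nat × Nat)) (o : List Char) (i : Nat) :
    asg (ps ++ qs) o i = asg qs (asg ps o i) i := by
  simp [asg, List.foldl_append]

theorem asg_set (ps : List (Nat × Nat)) (o : List Char) (i : Nat) (p : Nat) (a : Char)
    (h : p ∉ ps.map Prod.fst) :
    asg ps (o.set p a) i = (asg ps o i).set p a := by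
  induction ps generalizing o with
  | nil => rfl
  | cons q qs ih =>
    simp only [List.map_cons, List.mem_cons, not_or] at h
    rw [asg_cons, asg_cons, List.set_comm a (vch q.2 i) h.1, ih _ h.2]

theorem asg_congr (ps : List (Nat × Nat)) (o : List Char) (i i' : Nat)
    (h : ∀ pj ∈ ps, vch pj.2 i = vch pj.2 i') :
    asg ps o i = asg ps o i' := by
  induction ps generalizing o with
  | nil => rfl
  | cons q qs ih =>
    rw [asg_cons, asg_cons, h q (by simp), ih _ (fun pj hpj => h pj (by simp [hpj]))]

theorem asg_asg (ps : List (Nat × Nat)) (o : List Char) (i i' : Nat)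
    (h : (ps.map Prod.fst).Nodup) :
    asg ps (asg ps o i') i = asg ps o i := by
  induction ps generalizing o with
  | nil => rfl
  | cons q qs ih =>
    simp only [List.map_cons, List.nodup_cons] at h
    rw [asg_cons, asg_cons, asg_cons,
      asg_set qs _ i q.1 (vch q.2 i) h.1, ih _ h.2,
      asg_set qs o i q.1 (vch q.2 i') h.1, List.set_set,
      ← asg_set qs o i q.1 (vch q.2 i) h.1]

-- idxP facts
theorem idxP_append (ps qs : List Nat) (j : Nat) :
    idxP (ps ++ qs) j = idxP ps j ++ idxP qs (j + ps.length) := by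
  induction ps generalizing j with
  | nil => simp [idxP]
  | cons p ps ih => simp [idxP, ih, Nat.add_assoc, Nat.add_comm 1]

theorem idxP_map_fst (ps : List Nat) (j : Nat) : (idxP ps j).map Prod.fst = ps := by
  induction ps generalizing j with
  | nil => rfl
  | cons p ps ih => simp [idxP, ih]

theorem idxP_snd_lt (ps : List Nat) (j : Nat) :
    ∀ pj ∈ idxP ps j, pj.2 < j + ps.length := by
  induction ps generalizing j with
  | nil => simp [idxP]
  | cons p ps ih =>
    intro pj hpj
    rcases List.mem_cons.mp hpj with h | h
    · rw [h]; simp only [List.length_cons]; omega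
    · have := ih (j + 1) pj h
      simp only [List.length_cons]
      omega

-- posN facts
theorem posN_ge (l : List Char) (i : Nat) : ∀ x ∈ posN l i, i ≤ x := by
  induction l generalizing i with
  | nil => simp [posN]
  | cons c l ih =>
    intro x hx
    simp only [posN] at hx
    split at hx
    · rcases List.mem_cons.mp hx with h | h
      · omega
      · have := ih (i + 1) x h; omega
    · have := ih (i + 1) x hx; omega

theorem posN_nodup (l : List Char) (i : Nat) : (posN l i).Nodup := by
  induction l generalizing i with
  | nil => simp [posN]
  | cons c l ih =>
    simp only [posN]
    split
    · exact List.nodup_cons.mpr ⟨fun h => by have := posN_ge l (i + 1) i h; omega, ih (i + 1)⟩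
    · exact ih (i + 1)

theorem nodup_not_mem_take (ps : List Nat) (k : Nat) (hk : k < ps.length) (h : ps.Nodup) :
    ps[k] ∉ ps.take k := by
  intro hmem
  obtain ⟨m, hm, hget⟩ := List.getElem_of_mem hmem
  have hmk : m < k := by
    have := hm; simp only [List.length_take] at this; omega
  have hml : m < ps.length := by omega
  have hEq : ps[m] = ps[k] := by
    rw [← List.getElem_take (xs := ps) (j := k) (i := m) (h := hm)]; exact hget
  have := (List.Nodup.getElem_inj_iff h).mp hEq
  omega

-- bridge: the ports' Int-level poses is posN cast to Int
theorem posesOf_eq_aux (l : List Char) (n : Nat) :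
    (PySem.List.enumerate l ((n : Nat) : Int)).filterMap (fun ic => if ic.2 = '?' then some ic.1 else none)
      = natCastL (posN l n) := by
  induction l generalizing n with
  | nil => simp [PySem.List.enumerate_nil, posN, natCastL]
  | cons c l ih =>
    rw [PySem.List.enumerate_cons, List.filterMap_cons]
    have h1 : (((n : Nat) : Int) + 1) = (((n + 1 : Nat)) : Int) := by push_cast; ring
    rw [h1, ih (n + 1)]
    by_cases hc : c = '?'
    · simp [hc, posN, natCastL_cons]
    · simp [hc, posN]

theorem posesOf_eq (s : String) :
    posesOf s = natCastL (posN s.toList 0) := by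
  have h := posesOf_eq_aux s.toList 0
  rw [Nat.cast_zero] at h
  exact h

-- vch via testBit
theorem vch_testBit (j i : Nat) : vch j i = if i.testBit j then '#' else '.' := by
  unfold vch
  rw [Nat.two_pow_and]
  cases h : i.testBit j
  · simp
  · simp [Nat.pow_eq_zero]

theorem vch_low (j k i : Nat) (hj : j < k) :
    vch j (i + 2 ^ k) = vch j i := by
  rw [vch_testBit, vch_testBit, Nat.add_comm, Nat.testBit_two_pow_add_gt hj]

theorem vch_high_zero (k i : Nat) (hi : i < 2 ^ k) : vch k i = '.' := by
  rw [vch_testBit, Nat.testBit_lt_two_pow hi]; rfl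

theorem vch_high_one (k i : Nat) (hi : i < 2 ^ k) : vch k (i + 2 ^ k) = '#' := by
  rw [vch_testBit, Nat.add_comm, Nat.testBit_two_pow_add_eq, Nat.testBit_lt_two_pow hi]; rfl

-- the Int shift/band of the port, as a Nat computation
theorem band_shift_eq (j0 i : Nat) :
    PySem.Int.band ((1 : Int) <<< ((((((j0 : Nat) : Int)).toNat : Nat)) : Int)) ((i : Nat) : Int)
      = ((1 <<< j0 &&& i : Nat) : Int) := by
  have h0 : (((j0 : Nat) : Int)).toNat = j0 := by simp
  rw [h0]
  rw [show ((1 : Int) <<< ((j0 : Nat) : Int)) = ((Nat.shiftLeft' false 1 j0 : Nat) : Int) from rfl,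
    Nat.shiftLeft'_false]
  exact PySem.Int.band_natCast _ _

-- bridge for A's inner loop: enumerate/pySetD fold over cast poses = asg over idxP
theorem innerA_eq (ps : List Nat) (j0 : Nat) (o : List Char) (i : Nat) :
    (PySem.List.enumerate (natCastL ps) ((j0 : Nat) : Int)).foldl
        (fun o jp =>
          PySem.List.pySetD o jp.2
            (if PySem.Int.band ((1 : Int) <<< jp.1.toNat) ((i : Nat) : Int) ≠ 0 then '#' else '.')) o
      = asg (idxP ps j0) o i := by
  induction ps generalizing j0 o with
  | nil => simp [natCastL_nil, PySem.List.enumerate_nil, asg_nil, idxP]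
  | cons p ps ih =>
    rw [natCastL_cons, PySem.List.enumerate_cons]
    simp only [List.foldl_cons]
    have hcast : (((j0 : Nat) : Int) + 1) = (((j0 + 1 : Nat)) : Int) := by push_cast; ring
    rw [hcast, ih (j0 + 1)]
    rw [band_shift_eq j0 i]
    have hv : (if (((1 <<< j0 &&& i : Nat)) : Int) ≠ 0 then '#' else '.') = vch j0 i := by
      simp only [vch, Nat.one_shiftLeft, ne_eq, Nat.cast_eq_zero]
    rw [hv, show idxP (p :: ps) j0 = (p, j0) :: idxP ps (j0 + 1) from rfl, asg_cons,
      PySem.List.pySetD_natCast]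

-- B's recursion, in the Nat world
theorem permRec_eq (ps : List Nat) (hnd : ps.Nodup) (k : Nat) (hk : k ≤ ps.length)
    (o : List Char) :
    permRec (natCastL ps) o k
      = ((List.range (2 ^ k)).map (fun i => String.ofList (asg (idxP (ps.take k) 0) o i)),
         asg (idxP (ps.take k) 0) o (2 ^ k - 1)) := by
  induction k generalizing o with
  | zero => simp [permRec, List.take_zero, idxP, asg_nil]
  | succ k ih =>
    have hklt : k < ps.length := hk
    have hk' : k ≤ ps.length := Nat.le_of_lt hklt
    have hp : PySem.List.pyGetD (natCastL ps) ((k : Nat) : Int) 0 = ((ps[k] : Nat) : Int) := by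
      rw [PySem.List.pyGetD_natCast]
      unfold natCastL
      rw [List.getD_eq_getElem _ _ (by simpa using hklt)]
      simp
    have hnt : (idxP (ps.take k) 0).map Prod.fst = ps.take k := idxP_map_fst _ 0
    have hPt : ps[k] ∉ (idxP (ps.take k) 0).map Prod.fst := by
      rw [hnt]; exact nodup_not_mem_take ps k hklt hnd
    have hndt : ((idxP (ps.take k) 0).map Prod.fst).Nodup := by
      rw [hnt]; exact (List.take_sublist k ps).nodup hnd
    have hsnd : ∀ pj ∈ idxP (ps.take k) 0, pj.2 < k := by
      intro pj hpj
      have h1 := idxP_snd_lt (ps.take k) 0 pj hpj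
      have h2 : (ps.take k).length = k := by
        simp only [List.length_take]; omega
      omega
    have hlow : ∀ i, asg (idxP (ps.take k) 0) o (i + 2 ^ k) = asg (idxP (ps.take k) 0) o i := by
      intro i
      exact asg_congr _ o _ i (fun pj hpj => vch_low pj.2 k i (hsnd pj hpj))
    have hstep1 : ∀ i, asg (idxP (ps.take k) 0) (PySem.List.pySetD o ((ps[k] : Nat) : Int) '.') i
        = (asg (idxP (ps.take k) 0) o i).set ps[k] '.' := by
      intro i
      rw [PySem.List.pySetD_natCast]
      exact asg_set _ o i ps[k] '.' hPt
    have hstep2 : ∀ i,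
        asg (idxP (ps.take k) 0)
          (PySem.List.pySetD ((asg (idxP (ps.take k) 0) o (2 ^ k - 1)).set ps[k] '.') ((ps[k] : Nat) : Int) '#') i
        = (asg (idxP (ps.take k) 0) o i).set ps[k] '#' := by
      intro i
      rw [PySem.List.pySetD_natCast, List.set_set,
        asg_set _ _ i ps[k] '#' hPt, asg_asg _ o i (2 ^ k - 1) hndt]
    have hsplit : idxP (ps.take (k + 1)) 0 = idxP (ps.take k) 0 ++ [(ps[k], k)] := by
      rw [List.take_succ, List.getElem?_eq_getElem hklt]
      simp only [Option.toList_some]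
      have hlen2 : 0 + (ps.take k).length = k := by
        simp only [List.length_take, Nat.zero_add]; omega
      rw [idxP_append, hlen2]
      rfl
    have htgt : ∀ i, asg (idxP (ps.take (k + 1)) 0) o i
        = (asg (idxP (ps.take k) 0) o i).set ps[k] (vch k i) := by
      intro i
      rw [hsplit, asg_append]; rfl
    have hpow : 2 ^ (k + 1) = 2 ^ k + 2 ^ k := by ring
    simp only [permRec]
    rw [hp, ih hk']
    simp only
    rw [ih hk', hstep1 (2 ^ k - 1)]
    have hfst : (List.range (2 ^ (k + 1))).map
          (fun i => String.ofList (asg (idxP (ps.take (k + 1)) 0) o i))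
        = (List.range (2 ^ k)).map
            (fun i => String.ofList (asg (idxP (ps.take k) 0) (PySem.List.pySetD o ((ps[k] : Nat) : Int) '.') i))
          ++ (List.range (2 ^ k)).map
            (fun i => String.ofList (asg (idxP (ps.take k) 0)
              (PySem.List.pySetD ((asg (idxP (ps.take k) 0) o (2 ^ k - 1)).set ps[k] '.') ((ps[k] : Nat) : Int) '#') i)) := by
      rw [hpow, List.range_add, List.map_append, List.map_map]
      congr 1
      · refine List.map_congr_left fun i hi => ?_
        have hilt : i < 2 ^ k := List.mem_range.mp hi
        rw [htgt i, vch_high_zero k i hilt, hstep1 i]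
      · refine List.map_congr_left fun i hi => ?_
        have hilt : i < 2 ^ k := List.mem_range.mp hi
        simp only [Function.comp]
        rw [htgt (2 ^ k + i), Nat.add_comm (2 ^ k) i, vch_high_one k i hilt, hlow i, hstep2 i]
    have hsnd2 : asg (idxP (ps.take (k + 1)) 0) o (2 ^ (k + 1) - 1)
        = asg (idxP (ps.take k) 0)
            (PySem.List.pySetD ((asg (idxP (ps.take k) 0) o (2 ^ k - 1)).set ps[k] '.') ((ps[k] : Nat) : Int) '#') (2 ^ k - 1) := by
      have he : 2 ^ (k + 1) - 1 = (2 ^ k - 1) + 2 ^ k := by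
        have : 0 < 2 ^ k := Nat.two_pow_pos k
        omega
      rw [htgt (2 ^ (k + 1) - 1), he, vch_high_one k (2 ^ k - 1) (by
        have : 0 < 2 ^ k := Nat.two_pow_pos k
        omega), hlow (2 ^ k - 1), hstep2 (2 ^ k - 1)]
    rw [hfst, hsnd2]

-- A's inner loop with the default enumerate start
theorem innerA0_eq (ps : List Nat) (o : List Char) (i : Nat) :
    (PySem.List.enumerate (natCastL ps)).foldl
        (fun o jp =>
          PySem.List.pySetD o jp.2
            (if PySem.Int.band ((1 : Int) <<< jp.1.toNat) ((i : Nat) : Int) ≠ 0 then '#' else '.')) o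
      = asg (idxP ps 0) o i := by
  have h := innerA_eq ps 0 o i
  rwa [Nat.cast_zero] at h

-- A's outer fold, in the port's own shape, over a cast index list
theorem portA_fold (ps : List Nat) (hnd : ps.Nodup) (is : List Nat)
    (acc : List String) (o0 : List Char) :
    (List.foldl
      (fun (acc : List String × List Char) i =>
        let o := (PySem.List.enumerate (natCastL ps)).foldl
          (fun o jp =>
            PySem.List.pySetD o jp.2
              (if PySem.Int.band ((1 : Int) <<< jp.1.toNat) i ≠ 0 then '#' else '.')) acc.2
        (acc.1 ++ [String.ofList o], o))
      (acc, o0) (is.map (fun n => ((n : Nat) : Int)))).1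
      = acc ++ is.map (fun i => String.ofList (asg (idxP ps 0) o0 i)) := by
  induction is generalizing acc o0 with
  | nil => simp
  | cons i is ih =>
    simp only [List.map_cons, List.foldl_cons, innerA0_eq]
    rw [ih]
    simp only [List.append_assoc, List.singleton_append]
    congr 2
    refine List.map_congr_left fun i' _ => ?_
    rw [asg_asg (idxP ps 0) o0 i' i (by rw [idxP_map_fst]; exact hnd)]

theorem main_eq (s : String) : permutateString s = permutateString_alt s := by
  unfold permutateString permutateString_alt
  rw [posesOf_eq]
  by_cases h0 : posN s.toList 0 = []
  · simp [h0, natCastL_nil]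
  · have hne : natCastL (posN s.toList 0) ≠ [] := by
      simpa [natCastL_eq_nil_iff] using h0
    rw [if_neg hne, if_neg hne]
    rw [permRec_eq (posN s.toList 0) (posN_nodup s.toList 0) ((natCastL (posN s.toList 0)).length)
      (by rw [natCastL_length]) s.toList]
    rw [natCastL_length, List.take_length]
    have hr : PySem.List.pyRange 0 ((1 <<< (posN s.toList 0).length : Nat) : Int)
        = (List.range (2 ^ (posN s.toList 0).length)).map (fun n => ((n : Nat) : Int)) := by
      rw [PySem.List.pyRange_one]
      simp only [sub_zero, Int.toNat_natCast, Nat.one_shiftLeft, zero_add]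
    rw [hr]
    exact (portA_fold (posN s.toList 0) (posN_nodup s.toList 0)
      (List.range (2 ^ (posN s.toList 0).length)) [] s.toList).trans rfl

-- ===== VERDICT (by name: the statement is the Claim_ definition above) =====
theorem permutateString_spec : Claim_equal_permutateString := by
  intro s _
  unfold Spec_permutateString
  exact main_eq s
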